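-- pv_equiv track=rewrite | github.com/mainbrm1380/MIE1603-1653 | src/grouping_bin.py | get_heuristic_group_ub
-- ===== SOURCE A (Python) =====
-- def get_heuristic_group_ub(columns):
--   col_ub = 0
--   level_ub = 0
--   for col in columns:
--     col_ub += len(set([elem for elem in col if elem > 0]))
--   for lvl in range(len(columns[0])):
--     level_ub += len(set([col[lvl] for col in columns if col[lvl] > 0]))
--   return min(col_ub,level_ub), max(col_ub,level_ub)
-- ===== SOURCE B (Python) =====
-- def _distinct_pos(xs):
--     # count distinct positive values by sorting and counting run starts
--     ys = sorted([x for x in xs if x > 0])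
--     count = 0
--     prev = None
--     for v in ys:
--         if prev is None or v != prev:
--             count += 1
--         prev = v
--     return count
--
-- def get_heuristic_group_ub(columns):
--     col_ub = sum(_distinct_pos(col) for col in columns)
--     level_ub = sum(_distinct_pos([col[lvl] for col in columns])
--                    for lvl in range(len(columns[0])))
--     return min(col_ub, level_ub), max(col_ub, level_ub)
-- ===== Notes on version B (the rewrite author's own statement) =====
-- stated objective: alternative
-- what changed: Replaces A's hash-set distinct counting by sort-then-scan: each group's distinct positive values are counted by sorting them and counting run starts against the previous element, with the two totals obtained as sums of that helper; no sets at all.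
import Mathlib
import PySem

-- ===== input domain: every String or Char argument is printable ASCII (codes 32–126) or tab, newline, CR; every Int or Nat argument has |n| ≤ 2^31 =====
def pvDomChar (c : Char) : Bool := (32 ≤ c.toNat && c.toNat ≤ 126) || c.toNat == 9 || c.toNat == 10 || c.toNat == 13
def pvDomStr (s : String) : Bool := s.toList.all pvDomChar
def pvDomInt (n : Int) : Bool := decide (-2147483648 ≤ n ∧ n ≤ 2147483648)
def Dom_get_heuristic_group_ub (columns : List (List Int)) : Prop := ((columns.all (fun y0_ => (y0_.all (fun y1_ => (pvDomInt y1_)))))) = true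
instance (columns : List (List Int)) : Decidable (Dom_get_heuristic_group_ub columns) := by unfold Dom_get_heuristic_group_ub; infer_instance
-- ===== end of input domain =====

-- B counts each group's distinct positive values by sorting them and counting run starts
-- (sort-then-scan) instead of A's hash sets; return value only, same cost class.

-- ===== PORT A =====
def get_heuristic_group_ub (columns : List (List Int)) : Int × Int :=
  -- col_ub: for col in columns: col_ub += len(set([elem for elem in col if elem > 0]))
  let col_ub : Int := columns.foldl
    (fun acc col => acc + ((PySem.Set.ofList (col.filter (fun e => decide (0 < e)))).length : Int)) 0
  -- columns[0]; IndexError on empty columns is excluded by Pre_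
  let first : List Int := (PySem.List.pyGet? columns 0).getD []
  -- for lvl in range(len(columns[0])): level_ub += len(set([col[lvl] for col in columns if col[lvl] > 0]))
  let level_ub : Int := (PySem.List.pyRange 0 (first.length : Int) 1).foldl
    (fun acc lvl => acc +
      ((PySem.Set.ofList (columns.filterMap (fun col =>
        -- col[lvl]; IndexError (short column) is excluded by Pre_
        let v := (PySem.List.pyGet? col lvl).getD 0
        if 0 < v then some v else none))).length : Int)) 0
  (min col_ub level_ub, max col_ub level_ub)

-- ===== PORT B =====
-- _distinct_pos: sort the positive elements, count run starts against the previous element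
def pvDistinctPos (xs : List Int) : Int :=
  let ys := PySem.List.sorted (xs.filter (fun x => decide (0 < x))) (fun x => x) false
  (ys.foldl (fun st v =>
      ((if st.2 = none ∨ st.2 ≠ some v then st.1 + 1 else st.1), (some v : Option Int)))
    ((0 : Int), (none : Option Int))).1

def get_heuristic_group_ub_alt (columns : List (List Int)) : Int × Int :=
  let col_ub : Int := (columns.map pvDistinctPos).sum
  -- columns[0]; IndexError on empty columns is excluded by Pre_
  let first : List Int := (PySem.List.pyGet? columns 0).getD []
  -- sum(_distinct_pos([col[lvl] for col in columns]) for lvl in range(len(columns[0])))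
  let level_ub : Int := ((PySem.List.pyRange 0 (first.length : Int) 1).map
    (fun lvl => pvDistinctPos (columns.map (fun col =>
      -- col[lvl]; IndexError (short column) is excluded by Pre_
      (PySem.List.pyGet? col lvl).getD 0)))).sum
  (min col_ub level_ub, max col_ub level_ub)

-- ===== PRECONDITION & SPEC =====
-- Pre_ excludes exactly the inputs where Python A raises IndexError: empty columns
-- (columns[0]) and ragged inputs with a column shorter than columns[0] (col[lvl]).
-- (B raises IndexError on exactly the same inputs.)
def Pre_get_heuristic_group_ub (columns : List (List Int)) : Prop :=
  columns ≠ [] ∧ ∀ col ∈ columns, (columns.headD []).length ≤ col.length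
instance (columns : List (List Int)) : Decidable (Pre_get_heuristic_group_ub columns) := by
  unfold Pre_get_heuristic_group_ub; infer_instance

def pvWitness_get_heuristic_group_ub : List (List Int) := [[1, 2], [2, 0]]

def Spec_get_heuristic_group_ub (columns : List (List Int)) (out : Int × Int) : Prop :=
  out = get_heuristic_group_ub_alt columns
instance (columns : List (List Int)) (out : Int × Int) : Decidable (Spec_get_heuristic_group_ub columns out) := by
  unfold Spec_get_heuristic_group_ub; infer_instance

-- ===== CLAIM (what is proved, stated in full; the proofs are below) =====
def Claim_equal_get_heuristic_group_ub : Prop := ∀ (columns : List (List Int)), Dom_get_heuristic_group_ub columns → Pre_get_heuristic_group_ub columns → Spec_get_heuristic_group_ub columns (get_heuristic_group_ub columns)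

-- ===== LEMMAS AND PROOFS =====

-- the run-start count of a sorted list is the number of its distinct elements
theorem pv_runs (ys : List Int) (c : Int) (p : Option Int)
    (hs : ys.Pairwise (· ≤ ·)) (hp : ∀ q, p = some q → ∀ x ∈ ys, q ≤ x) :
    (ys.foldl (fun st v =>
        ((if st.2 = none ∨ st.2 ≠ some v then st.1 + 1 else st.1), (some v : Option Int)))
      (c, p)).1
    = c + (((p.elim ys.toFinset (fun q => ys.toFinset.erase q)).card : Nat) : Int) := by
  induction ys generalizing c p with
  | nil => cases p <;> simp
  | cons v t ih =>
    rw [List.pairwise_cons] at hs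
    obtain ⟨hv, ht⟩ := hs
    rw [List.foldl_cons, ih _ _ ht (by rintro q ⟨rfl⟩; exact hv)]
    have hins : (insert v t.toFinset).card = (t.toFinset.erase v).card + 1 := by
      have h1 : insert v (t.toFinset.erase v) = insert v t.toFinset := by
        ext x; simp [Finset.mem_insert, Finset.mem_erase]; tauto
      rw [← h1, Finset.card_insert_of_notMem (Finset.notMem_erase _ _)]
    cases p with
    | none =>
      simp only [Option.elim, List.toFinset_cons]
      split_ifs with h
      · omega
      · simp at h
    | some q =>
      by_cases hq : q = v
      · subst hq
        rw [if_neg (by simp)]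
        simp only [Option.elim, List.toFinset_cons, Finset.erase_insert_eq_erase]
      · have hqv : q ≤ v := hp q rfl v (List.mem_cons_self ..)
        have hqt : q ∉ (v :: t).toFinset := by
          simp only [List.toFinset_cons, Finset.mem_insert, List.mem_toFinset]
          rintro (rfl | hq')
          · exact hq rfl
          · exact hq (le_antisymm hqv (hv q hq'))
        rw [if_pos (Or.inr (by simpa using hq))]
        simp only [Option.elim, List.toFinset_cons] at hqt ⊢
        rw [Finset.erase_eq_of_notMem hqt, hins]
        omega

-- pvDistinctPos counts the distinct positive elements
theorem pv_distinctPos_eq (xs : List Int) :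
    pvDistinctPos xs = (((xs.filter (fun x => decide (0 < x))).toFinset.card : Nat) : Int) := by
  unfold pvDistinctPos
  have hperm : (PySem.List.sorted (xs.filter (fun x => decide (0 < x))) (fun x => x) false).Perm
      (xs.filter (fun x => decide (0 < x))) := PySem.List.sorted_perm _ _ _
  have hpw : (PySem.List.sorted (xs.filter (fun x => decide (0 < x))) (fun x => x) false).Pairwise
      (· ≤ ·) := by
    have := PySem.List.sorted_pairwise (xs := xs.filter (fun x => decide (0 < x)))
      (key := fun x => x)
    simpa using this
  rw [pv_runs _ _ _ hpw (by simp)]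
  rw [List.toFinset_eq_of_perm _ _ hperm]
  simp

-- A's set size is the same count
theorem pv_set_len_eq (l : List Int) :
    ((PySem.Set.ofList l).length : Int) = ((l.toFinset.card : Nat) : Int) := by
  have hnd : (PySem.Set.ofList l).Nodup := PySem.Set.nodup_ofList l
  have hmem : (PySem.Set.ofList l).toFinset = l.toFinset := by
    apply Finset.ext; intro a
    simp [List.mem_toFinset, PySem.Set.mem_ofList]
  rw [← hmem, List.toFinset_card_of_nodup hnd]

-- the per-level comprehension with a positivity guard is the filter of the row
theorem pv_filterMap_eq_filter_map (cs : List (List Int)) (g : List Int → Int) :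
    cs.filterMap (fun col => if 0 < g col then some (g col) else none)
    = (cs.map g).filter (fun x => decide (0 < x)) := by
  induction cs with
  | nil => rfl
  | cons col cs ih =>
    by_cases h : 0 < g col <;> simp [h, ih]

-- ===== VERDICT (by name: the statement is the Claim_ definition above) =====
theorem get_heuristic_group_ub_spec : Claim_equal_get_heuristic_group_ub := by
  intro columns _hdom _hpre
  unfold Spec_get_heuristic_group_ub get_heuristic_group_ub get_heuristic_group_ub_alt
  dsimp only
  have hcol : columns.foldl
      (fun acc col => acc + ((PySem.Set.ofList (col.filter (fun e => decide (0 < e)))).length : Int)) 0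
      = (columns.map pvDistinctPos).sum := by
    rw [PySem.List.foldl_add, zero_add]
    apply congrArg
    apply List.map_congr_left
    intro col _
    rw [pv_distinctPos_eq, pv_set_len_eq]
  have hlvl : ∀ lvl : Int, ((PySem.Set.ofList (columns.filterMap (fun col =>
        let v := (PySem.List.pyGet? col lvl).getD 0
        if 0 < v then some v else none))).length : Int)
      = pvDistinctPos (columns.map (fun col => (PySem.List.pyGet? col lvl).getD 0)) := by
    intro lvl
    rw [pv_distinctPos_eq, pv_set_len_eq,
      pv_filterMap_eq_filter_map columns (fun col => (PySem.List.pyGet? col lvl).getD 0)]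
  rw [hcol, PySem.List.foldl_add, zero_add]
  have : ((PySem.List.pyRange 0 (((PySem.List.pyGet? columns 0).getD []).length : Int) 1).map
      (fun lvl => ((PySem.Set.ofList (columns.filterMap (fun col =>
        let v := (PySem.List.pyGet? col lvl).getD 0
        if 0 < v then some v else none))).length : Int)))
      = ((PySem.List.pyRange 0 (((PySem.List.pyGet? columns 0).getD []).length : Int) 1).map
      (fun lvl => pvDistinctPos (columns.map (fun col => (PySem.List.pyGet? col lvl).getD 0)))) := by
    apply List.map_congr_left
    intro lvl _
    exact hlvl lvl
  rw [this]
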